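-- pv_equiv track=rewrite | github.com/timeyyy/system_hotkey | build/lib/system_hotkey/system_hotkey.py | order_hotkey
-- ===== SOURCE A (Python) =====
-- def order_hotkey(hotkey):
-- 	# Order doesn't matter for modifiers, so we force an order here
-- 	# control - shift - alt - win, and when we read back the modifers we spit them
-- 	# out in the same value so our dictionary keys always match
-- 	if len(hotkey) > 2:
-- 		new_hotkey = []
-- 		for mod in hotkey[:-1]:
-- 			if 'control' == mod:
-- 				new_hotkey.append(mod)
-- 		for mod in hotkey[:-1]:
-- 			if 'shift' == mod:
-- 				new_hotkey.append(mod)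
-- 		for mod in hotkey[:-1]:
-- 			if 'alt' == mod:
-- 				new_hotkey.append(mod)
-- 		for mod in hotkey[:-1]:
-- 			if 'win' == mod:
-- 				new_hotkey.append(mod)
-- 		new_hotkey.append(hotkey[-1])
-- 		hotkey = new_hotkey
-- 	return hotkey
-- ===== SOURCE B (Python) =====
-- def order_hotkey(hotkey):
--     # canonical order via a priority map and one stable sort, instead of four filter scans
--     prio = {'control': 0, 'shift': 1, 'alt': 2, 'win': 3}
--     if len(hotkey) > 2:
--         hotkey = sorted((m for m in hotkey[:-1] if m in prio), key=prio.get) + [hotkey[-1]]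
--     return hotkey
-- ===== Notes on version B (the rewrite author's own statement) =====
-- stated objective: idiomatic
-- what changed: Replaces A's four separate per-modifier filter scans with one filter against a priority map followed by a single stable sort keyed by that map.
import Mathlib
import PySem

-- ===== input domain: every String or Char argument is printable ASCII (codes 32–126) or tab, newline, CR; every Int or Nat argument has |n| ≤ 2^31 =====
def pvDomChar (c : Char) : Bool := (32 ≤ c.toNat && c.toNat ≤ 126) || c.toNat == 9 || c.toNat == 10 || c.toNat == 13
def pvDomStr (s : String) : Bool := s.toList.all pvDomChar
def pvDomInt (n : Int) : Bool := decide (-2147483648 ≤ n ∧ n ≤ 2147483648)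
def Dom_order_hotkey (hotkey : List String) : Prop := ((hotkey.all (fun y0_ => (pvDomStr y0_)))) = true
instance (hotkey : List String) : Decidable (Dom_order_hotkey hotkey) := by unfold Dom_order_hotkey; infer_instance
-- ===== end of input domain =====

-- ===== PORT A =====
-- B sorts the known modifiers once by a priority map instead of A's four filter scans; return value only.
def order_hotkey (hotkey : List String) : List String :=
  if 2 < hotkey.length then
    let body := PySem.List.slice hotkey none (some (-1))
    let nh := body.foldl (fun acc mod => if "control" == mod then acc ++ [mod] else acc) []
    let nh := body.foldl (fun acc mod => if "shift" == mod then acc ++ [mod] else acc) nh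
    let nh := body.foldl (fun acc mod => if "alt" == mod then acc ++ [mod] else acc) nh
    let nh := body.foldl (fun acc mod => if "win" == mod then acc ++ [mod] else acc) nh
    nh ++ [PySem.List.pyGetD hotkey (-1) ""]
  else hotkey

-- ===== PORT B =====
def pvPrio : PySem.Dict String Int :=
  PySem.Dict.mk [("control", 0), ("shift", 1), ("alt", 2), ("win", 3)]

def order_hotkey_alt (hotkey : List String) : List String :=
  if 2 < hotkey.length then
    let body := PySem.List.slice hotkey none (some (-1))
    (PySem.List.sorted (body.filter (fun m => pvPrio.contains m))
        (fun m => pvPrio.getD m 0) false)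
      ++ [PySem.List.pyGetD hotkey (-1) ""]
  else hotkey

-- ===== PRECONDITION & SPEC =====
def Spec_order_hotkey (hotkey : List String) (out : List String) : Prop := out = order_hotkey_alt hotkey
instance (hotkey : List String) (out : List String) : Decidable (Spec_order_hotkey hotkey out) := by unfold Spec_order_hotkey; infer_instance

-- ===== CLAIM (what is proved, stated in full; the proofs are below) =====
def Claim_equal_order_hotkey : Prop := ∀ (hotkey : List String), Dom_order_hotkey hotkey → Spec_order_hotkey hotkey (order_hotkey hotkey)

-- ===== LEMMAS AND PROOFS =====

-- the canonical 4-block shape both results take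
def pvCanon (a b c d : Nat) : List String :=
  List.replicate a "control" ++ List.replicate b "shift" ++ List.replicate c "alt" ++ List.replicate d "win"

-- insertBy places x after a prefix it does not go before and before a suffix it does
lemma insertBy_split (before : String → String → Bool) (x : String) (l1 l2 : List String)
    (h1 : ∀ y ∈ l1, before x y = false) (h2 : ∀ y ∈ l2, before x y = true) :
    PySem.List.insertBy before x (l1 ++ l2) = l1 ++ x :: l2 := by
  induction l1 with
  | nil =>
    cases l2 with
    | nil => rfl
    | cons h t => simp [PySem.List.insertBy, h2 h (by simp)]
  | cons a l1 ih =>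
    simp only [List.cons_append, PySem.List.insertBy, h1 a (by simp), Bool.false_eq_true,
      if_false]
    rw [ih (fun y hy => h1 y (by simp [hy]))]

lemma filter_eq_replicate_count (l : List String) (v : String) :
    l.filter (fun x => v == x) = List.replicate (l.count v) v := by
  induction l with
  | nil => rfl
  | cons h t ih =>
    by_cases hv : v = h
    · subst hv; simp [ih, List.replicate_succ]
    · simp [hv, Ne.symm hv, ih]

lemma foldl_app_if (l acc : List String) (v : String) :
    l.foldl (fun acc x => if v == x then acc ++ [x] else acc) acc
      = acc ++ l.filter (fun x => v == x) := by
  induction l generalizing acc with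
  | nil => simp
  | cons h t ih =>
    rw [List.foldl_cons, List.filter_cons]
    by_cases hv : v = h
    · rw [if_pos (by simp [hv]), if_pos (by simp [hv]), ih, List.append_assoc]; rfl
    · rw [if_neg (by simp [hv]), if_neg (by simp [hv]), ih]

-- inserting each known modifier into a canonical list bumps its own block
lemma insert_canon_control (a b c d : Nat) :
    PySem.List.insertBy (fun p q => decide (pvPrio.getD p 0 < pvPrio.getD q 0)) "control"
      (pvCanon a b c d) = pvCanon (a + 1) b c d := by
  unfold pvCanon
  simp only [List.append_assoc]
  rw [insertBy_split _ _ (List.replicate a "control")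
        (List.replicate b "shift" ++ (List.replicate c "alt" ++ List.replicate d "win"))
        (by intro y hy; simp only [List.eq_of_mem_replicate hy]; decide)
        (by intro y hy
            simp only [List.mem_append, List.mem_replicate] at hy
            rcases hy with ⟨_, rfl⟩ | ⟨_, rfl⟩ | ⟨_, rfl⟩ <;> decide)]
  simp [List.replicate_succ']

lemma insert_canon_shift (a b c d : Nat) :
    PySem.List.insertBy (fun p q => decide (pvPrio.getD p 0 < pvPrio.getD q 0)) "shift"
      (pvCanon a b c d) = pvCanon a (b + 1) c d := by
  unfold pvCanon
  rw [show List.replicate a "control" ++ List.replicate b "shift" ++ List.replicate c "alt" ++ List.replicate d "win"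
        = (List.replicate a "control" ++ List.replicate b "shift") ++ (List.replicate c "alt" ++ List.replicate d "win") by simp]
  rw [insertBy_split _ _ _ _
        (by intro y hy
            rcases List.mem_append.1 hy with hy | hy
            · simp only [List.eq_of_mem_replicate hy]; decide
            · simp only [List.eq_of_mem_replicate hy]; decide)
        (by intro y hy
            rcases List.mem_append.1 hy with hy | hy
            · simp only [List.eq_of_mem_replicate hy]; decide
            · simp only [List.eq_of_mem_replicate hy]; decide)]
  simp [List.replicate_succ']

lemma insert_canon_alt (a b c d : Nat) :
    PySem.List.insertBy (fun p q => decide (pvPrio.getD p 0 < pvPrio.getD q 0)) "alt"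
      (pvCanon a b c d) = pvCanon a b (c + 1) d := by
  unfold pvCanon
  rw [show List.replicate a "control" ++ List.replicate b "shift" ++ List.replicate c "alt" ++ List.replicate d "win"
        = (List.replicate a "control" ++ List.replicate b "shift" ++ List.replicate c "alt") ++ List.replicate d "win" by simp]
  rw [insertBy_split _ _ _ _
        (by intro y hy
            rcases List.mem_append.1 hy with hy | hy
            · rcases List.mem_append.1 hy with hy | hy
              · simp only [List.eq_of_mem_replicate hy]; decide
              · simp only [List.eq_of_mem_replicate hy]; decide
            · simp only [List.eq_of_mem_replicate hy]; decide)
        (by intro y hy; simp only [List.eq_of_mem_replicate hy]; decide)]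
  simp [List.replicate_succ']

lemma insert_canon_win (a b c d : Nat) :
    PySem.List.insertBy (fun p q => decide (pvPrio.getD p 0 < pvPrio.getD q 0)) "win"
      (pvCanon a b c d) = pvCanon a b c (d + 1) := by
  unfold pvCanon
  rw [show List.replicate a "control" ++ List.replicate b "shift" ++ List.replicate c "alt" ++ List.replicate d "win"
        = (List.replicate a "control" ++ List.replicate b "shift" ++ List.replicate c "alt" ++ List.replicate d "win") ++ [] by simp]
  rw [insertBy_split _ _ _ []
        (by intro y hy
            rcases List.mem_append.1 hy with hy | hy
            · rcases List.mem_append.1 hy with hy | hy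
              · rcases List.mem_append.1 hy with hy | hy
                · simp only [List.eq_of_mem_replicate hy]; decide
                · simp only [List.eq_of_mem_replicate hy]; decide
              · simp only [List.eq_of_mem_replicate hy]; decide
            · simp only [List.eq_of_mem_replicate hy]; decide)
        (by intro y hy; cases hy)]
  simp [List.replicate_succ']

-- a string the priority map contains is one of the four names
lemma contains_cases (m : String) (h : pvPrio.contains m = true) :
    m = "control" ∨ m = "shift" ∨ m = "alt" ∨ m = "win" := by
  simp [pvPrio, PySem.Dict.contains_mk] at h
  tauto

-- the sort loop over the kept modifiers keeps the canonical shape, bumping counts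
lemma foldl_insert_canon (body : List String) (a b c d : Nat) :
    (body.filter (fun m => pvPrio.contains m)).foldl
      (fun acc x => PySem.List.insertBy
        (fun p q => decide (pvPrio.getD p 0 < pvPrio.getD q 0)) x acc)
      (pvCanon a b c d)
    = pvCanon (a + body.count "control") (b + body.count "shift")
        (c + body.count "alt") (d + body.count "win") := by
  induction body generalizing a b c d with
  | nil => simp
  | cons h t ih =>
    by_cases hk : pvPrio.contains h = true
    · rw [List.filter_cons_of_pos hk, List.foldl_cons]
      rcases contains_cases h hk with rfl | rfl | rfl | rfl
      · rw [insert_canon_control, ih]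
        congr 1 <;> · simp [List.count_cons]; omega
      · rw [insert_canon_shift, ih]
        congr 1 <;> · simp [List.count_cons]; omega
      · rw [insert_canon_alt, ih]
        congr 1 <;> · simp [List.count_cons]; omega
      · rw [insert_canon_win, ih]
        congr 1 <;> · simp [List.count_cons]; omega
    · rw [List.filter_cons_of_neg (by simpa using hk), ih]
      have h1 : h ≠ "control" := fun e => hk (by rw [e]; decide)
      have h2 : h ≠ "shift" := fun e => hk (by rw [e]; decide)
      have h3 : h ≠ "alt" := fun e => hk (by rw [e]; decide)
      have h4 : h ≠ "win" := fun e => hk (by rw [e]; decide)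
      simp [h1, h2, h3, h4]

lemma sorted_filter_eq_canon (body : List String) :
    PySem.List.sorted (body.filter (fun m => pvPrio.contains m))
        (fun m => pvPrio.getD m 0) false
      = pvCanon (body.count "control") (body.count "shift")
          (body.count "alt") (body.count "win") := by
  rw [PySem.List.sorted_eq_foldl_insertBy]
  simpa using foldl_insert_canon body 0 0 0 0

-- ===== VERDICT (by name: the statement is the Claim_ definition above) =====
theorem order_hotkey_spec : Claim_equal_order_hotkey := by
  intro hotkey _
  unfold Spec_order_hotkey order_hotkey order_hotkey_alt
  by_cases h : 2 < hotkey.length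
  · simp only [h, if_pos]
    rw [sorted_filter_eq_canon]
    simp only [foldl_app_if, filter_eq_replicate_count, List.nil_append, pvCanon,
      List.append_assoc]
  · simp [h]
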